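-- pv_equiv track=rewrite | github.com/Fondamenti18/fondamenti-di-programmazione | students/1796443/homework01/program03.py | crea_chiave
-- ===== SOURCE A (Python) =====
-- def crea_chiave(s1):
--     "Funzione che, presa una stringa, la usa per ritornare una lista di tuple che fungono da chiave di codifica e decodifica di un testo"
--     ls=[]
--     ls1=[]
--     for x1 in s1:
--         if ord(x1)>=97 and ord(x1)<=122:
--             ls+=[x1]
--     ls.reverse()
--     for x1 in ls:
--         if not x1 in ls1:
--             ls1+=[x1]
--     ls1.reverse()
--     ls2=sorted(ls1)
--     ls3=[]
--     c=0
--     while c<len(ls1):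
--         ls3+=[(ls1[c],ls2[c])]
--         c+=1
--     return ls3
-- ===== SOURCE B (Python) =====
-- def crea_chiave(s1):
--     "Key built in one pass: move-to-end list of the lowercase letters, paired with its sorted copy"
--     order = []
--     for ch in s1:
--         if 97 <= ord(ch) <= 122:
--             order = [c for c in order if c != ch] + [ch]
--     return list(zip(order, sorted(order)))
-- ===== Notes on version B (the rewrite author's own statement) =====
-- stated objective: simpler
-- what changed: A's four list passes (filter, reverse, membership-dedup, reverse) plus an index-counting while loop are replaced by one move-to-end fold over the string (each lowercase letter is moved to the end of the order list) zipped with its sorted copy.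
import Mathlib
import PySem

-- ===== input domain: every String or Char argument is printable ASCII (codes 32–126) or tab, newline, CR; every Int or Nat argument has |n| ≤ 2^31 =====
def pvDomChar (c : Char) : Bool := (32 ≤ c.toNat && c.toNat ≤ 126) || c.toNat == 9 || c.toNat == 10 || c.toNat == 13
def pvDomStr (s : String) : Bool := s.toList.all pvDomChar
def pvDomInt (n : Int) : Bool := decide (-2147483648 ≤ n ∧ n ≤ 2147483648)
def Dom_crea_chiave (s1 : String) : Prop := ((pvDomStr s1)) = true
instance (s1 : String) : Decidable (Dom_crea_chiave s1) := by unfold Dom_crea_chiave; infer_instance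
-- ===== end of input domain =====

-- B replaces A's filter/reverse/dedup/reverse passes and index-while by one move-to-end fold plus a zip (simpler, not faster).

-- ===== PORT A =====
-- the while loop: c counts up, appends (ls1[c], ls2[c]) to ls3 (indices guarded by c < len)
def creaLoopA (ls1 ls2 : List Char) (c : Nat) (ls3 : List (String × String)) :
    List (String × String) :=
  if _h : c < ls1.length then
    creaLoopA ls1 ls2 (c + 1) (ls3 ++ [(String.singleton (ls1.getD c 'a'), String.singleton (ls2.getD c 'a'))])
  else ls3
termination_by ls1.length - c

def crea_chiave (s1 : String) : List (String × String) :=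
  let ls := s1.toList.foldl (fun ls x1 => if 97 ≤ x1.toNat ∧ x1.toNat ≤ 122 then ls ++ [x1] else ls) []
  let ls := ls.reverse
  let ls1 := ls.foldl (fun ls1 x1 => if x1 ∈ ls1 then ls1 else ls1 ++ [x1]) []
  let ls1 := ls1.reverse
  let ls2 := PySem.List.sorted ls1 (fun x => x) false
  creaLoopA ls1 ls2 0 []

-- ===== PORT B =====
def crea_chiave_alt (s1 : String) : List (String × String) :=
  let order := s1.toList.foldl
    (fun order ch => if 97 ≤ ch.toNat ∧ ch.toNat ≤ 122 then order.filter (fun c => c ≠ ch) ++ [ch] else order) []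
  (order.zip (PySem.List.sorted order (fun x => x) false)).map
    (fun p => (String.singleton p.1, String.singleton p.2))

-- ===== PRECONDITION & SPEC =====
def Spec_crea_chiave (s1 : String) (out : List (String × String)) : Prop := out = crea_chiave_alt s1
instance (s1 : String) (out : List (String × String)) : Decidable (Spec_crea_chiave s1 out) := by unfold Spec_crea_chiave; infer_instance

-- ===== CLAIM (what is proved, stated in full; the proofs are below) =====
def Claim_equal_crea_chiave : Prop := ∀ (s1 : String), Dom_crea_chiave s1 → Spec_crea_chiave s1 (crea_chiave s1)

-- ===== LEMMAS AND PROOFS =====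

-- abbreviations for the two dedup strategies (proof-only helpers)
def ddStep (a : List Char) (x : Char) : List Char := if x ∈ a then a else a ++ [x]
def mteStep (s : List Char) (c : Char) : List Char := s.filter (fun a => a ≠ c) ++ [c]

theorem mem_dd_foldl (r : List Char) : ∀ (acc : List Char) (x : Char),
    x ∈ r.foldl ddStep acc ↔ x ∈ acc ∨ x ∈ r := by
  induction r with
  | nil => simp
  | cons c r ih =>
      intro acc x
      simp only [List.foldl_cons, ih, ddStep]
      split_ifs with h
      · constructor
        · rintro (h1 | h2) <;> simp_all
        · rintro (h1 | h2)
          · exact Or.inl h1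
          · rcases List.mem_cons.1 h2 with rfl | h2
            · exact Or.inl h
            · exact Or.inr h2
      · simp only [List.mem_append, List.mem_cons]
        tauto

theorem mte_foldl_acc (l : List Char) : ∀ (acc : List Char),
    l.foldl mteStep acc = acc.filter (fun a => !l.contains a) ++ l.foldl mteStep [] := by
  induction l with
  | nil => simp
  | cons c l ih =>
      intro acc
      have h2 := ih (mteStep [] c)
      simp only [List.foldl_cons, ih (mteStep acc c)]
      rw [h2]
      simp only [mteStep, List.filter_append, List.filter_filter]
      have hf : ∀ (a : List Char),
          a.filter (fun x => !l.contains x && decide (x ≠ c)) = a.filter (fun x => !(c :: l).contains x) := by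
        intro a
        apply List.filter_congr
        intro x _
        simp [eq_comm]
        rw [Bool.and_comm]
      rw [hf acc]
      simp

theorem mte_eq_dd (l : List Char) :
    l.foldl mteStep [] = (l.reverse.foldl ddStep []).reverse := by
  induction l with
  | nil => simp
  | cons c l ih =>
      have hstep : List.foldl mteStep (mteStep [] c) l
          = [c].filter (fun a => !l.contains a) ++ l.foldl mteStep [] := by
        have := mte_foldl_acc l (mteStep [] c)
        simpa [mteStep] using this
      simp only [List.foldl_cons, hstep, List.reverse_cons, List.foldl_append, List.foldl_cons,
        List.foldl_nil]
      by_cases hc : c ∈ l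
      · have hmem : c ∈ l.reverse.foldl ddStep [] := by
          rw [mem_dd_foldl]; simp [hc]
        simp only [ddStep, if_pos hmem]
        rw [← ih]
        simp [List.filter, hc]
      · have hmem : c ∉ l.reverse.foldl ddStep [] := by
          rw [mem_dd_foldl]; simp [hc]
        simp only [ddStep, if_neg hmem]
        rw [List.reverse_append]
        simp only [List.reverse_singleton, List.singleton_append, ← ih]
        simp [List.filter, hc]

theorem creaLoopA_eq (n : Nat) : ∀ (ls1 ls2 : List Char) (c : Nat) (ls3 : List (String × String)),
    ls2.length = ls1.length → n = ls1.length - c →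
    creaLoopA ls1 ls2 c ls3
      = ls3 ++ (((ls1.drop c).zip (ls2.drop c)).map
          (fun p => (String.singleton p.1, String.singleton p.2))) := by
  induction n with
  | zero =>
      intro ls1 ls2 c ls3 hlen hn
      have hc : ¬ c < ls1.length := by omega
      rw [creaLoopA, dif_neg hc]
      rw [List.drop_eq_nil_of_le (by omega)]
      simp
  | succ n ih =>
      intro ls1 ls2 c ls3 hlen hn
      have hc : c < ls1.length := by omega
      have hc2 : c < ls2.length := by omega
      rw [creaLoopA, dif_pos hc, ih ls1 ls2 (c + 1) _ hlen (by omega)]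
      conv_rhs => rw [List.drop_eq_getElem_cons hc, List.drop_eq_getElem_cons hc2]
      rw [List.zip_cons_cons, List.map_cons]
      simp [List.getD_eq_getElem?_getD, List.getElem?_eq_getElem hc, List.getElem?_eq_getElem hc2]

theorem filter_if_foldl (l : List Char) (init : List Char) :
    l.foldl (fun ls x1 => if 97 ≤ x1.toNat ∧ x1.toNat ≤ 122 then ls ++ [x1] else ls) init
      = init ++ l.filter (fun x1 => decide (97 ≤ x1.toNat ∧ x1.toNat ≤ 122)) := by
  induction l generalizing init with
  | nil => simp
  | cons c l ih =>
      simp only [List.foldl_cons, List.filter_cons]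
      by_cases h : 97 ≤ c.toNat ∧ c.toNat ≤ 122
      · rw [if_pos h, ih]; simp [h]
      · rw [if_neg h, ih]; simp [h]

-- ===== VERDICT (by name: the statement is the Claim_ definition above) =====
theorem crea_chiave_spec : Claim_equal_crea_chiave := by
  intro s1 _
  unfold Spec_crea_chiave crea_chiave crea_chiave_alt
  simp only []
  set l := s1.toList with hl
  set p : Char → Bool := fun x1 => decide (97 ≤ x1.toNat ∧ x1.toNat ≤ 122) with hp
  have hA1 : l.foldl (fun ls x1 => if 97 ≤ x1.toNat ∧ x1.toNat ≤ 122 then ls ++ [x1] else ls) []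
      = l.filter p := by
    rw [filter_if_foldl]; simp [hp]
  have hB1 : l.foldl
      (fun order ch => if 97 ≤ ch.toNat ∧ ch.toNat ≤ 122 then order.filter (fun c => c ≠ ch) ++ [ch] else order) []
      = (l.filter p).foldl mteStep [] := by
    rw [List.foldl_filter]
    have hfun : (fun (order : List Char) ch => if 97 ≤ ch.toNat ∧ ch.toNat ≤ 122 then order.filter (fun c => c ≠ ch) ++ [ch] else order)
        = fun x y => if p y = true then mteStep x y else x := by
      funext o ch
      by_cases h : 97 ≤ ch.toNat ∧ ch.toNat ≤ 122 <;> simp [mteStep, hp, h]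
    rw [hfun]
  have hAB : (((l.filter p).reverse.foldl (fun ls1 x1 => if x1 ∈ ls1 then ls1 else ls1 ++ [x1]) []).reverse)
      = (l.filter p).foldl mteStep [] := by
    rw [mte_eq_dd]
    rfl
  rw [hA1, hB1, ← hAB]
  set ls1 := ((l.filter p).reverse.foldl (fun ls1 x1 => if x1 ∈ ls1 then ls1 else ls1 ++ [x1]) []).reverse with hls1
  have hlen : (PySem.List.sorted ls1 (fun x => x) false).length = ls1.length :=
    PySem.List.length_sorted _ _ _
  rw [creaLoopA_eq (ls1.length - 0) ls1 _ 0 [] hlen rfl]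
  simp
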